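-- pv_equiv track=rewrite | github.com/backupbrain/hades | __init__.py | camel_to_snake
-- ===== SOURCE A (Python) =====
-- def camel_to_snake(str):
--     """Convert camel case to snake case."""
--     res = [str[0].lower()]
--     for c in str[1:]:
--         if c in ('ABCDEFGHIJKLMNOPQRSTUVWXYZ'):
--             res.append('_')
--             res.append(c.lower())
--         else:
--             res.append(c)
--     return ''.join(res)
-- ===== SOURCE B (Python) =====
-- import re
--
--
-- def camel_to_snake(str):
--     """Convert camel case to snake case."""
--     first = str[0].lower()
--     rest = re.sub(r'[A-Z]', lambda m: '_' + m.group(0).lower(), str[1:])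
--     return first + rest
-- ===== Notes on version B (the rewrite author's own statement) =====
-- stated objective: idiomatic
-- what changed: Replaces the explicit per-character loop with list accumulator by a single re.sub over the tail with pattern [A-Z] and a lowercasing replacement, keeping str[0] so the empty string still raises; Pre_ excludes only the empty string, on which both implementations raise IndexError.
import Mathlib
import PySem

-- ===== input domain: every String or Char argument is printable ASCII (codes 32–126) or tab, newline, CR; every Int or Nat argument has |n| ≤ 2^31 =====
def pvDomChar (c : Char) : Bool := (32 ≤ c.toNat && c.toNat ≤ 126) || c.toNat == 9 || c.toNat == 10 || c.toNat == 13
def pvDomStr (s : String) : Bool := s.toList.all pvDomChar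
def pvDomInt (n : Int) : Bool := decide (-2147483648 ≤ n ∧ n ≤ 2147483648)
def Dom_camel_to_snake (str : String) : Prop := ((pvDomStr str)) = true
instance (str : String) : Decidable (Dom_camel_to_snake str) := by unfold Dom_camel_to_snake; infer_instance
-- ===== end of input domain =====

-- B replaces A's explicit character loop and list accumulator by one regex-style
-- substitution over the tail (idiomatic; same O(n) cost). Both raise on "" (excluded by Pre_).


-- ===== PORT A =====
-- res = [str[0].lower()]; for c in str[1:]: if c in 'A..Z': res += ['_', c.lower()] else res += [c]; ''.join(res)
def camel_to_snake (str : String) : String :=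
  match str.toList with
  | [] => ""   -- unreachable under Pre_: str[0] raises IndexError in Python
  | c0 :: rest =>
    let res : List Char :=
      rest.foldl (fun res c =>
        if "ABCDEFGHIJKLMNOPQRSTUVWXYZ".toList.contains c then
          (res ++ ['_']) ++ [PySem.Chars.lowerChar c]
        else
          res ++ [c])
        [PySem.Chars.lowerChar c0]
    String.ofList res

-- ===== PORT B =====
-- first = str[0].lower(); rest = re.sub('[A-Z]', '_' + lower, str[1:]); first + rest
-- re.sub with the single-character class [A-Z] replaces exactly each ASCII uppercase char,
-- so it is ported as a flatMap over the tail's characters (exact for this pattern).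
def camel_to_snake_alt (str : String) : String :=
  match str.toList with
  | [] => ""   -- unreachable under Pre_: str[0] raises IndexError in Python
  | c0 :: rest =>
    String.ofList (PySem.Chars.lowerChar c0 ::
      rest.flatMap (fun c =>
        if 'A' ≤ c && c ≤ 'Z' then ['_', PySem.Chars.lowerChar c] else [c]))

-- ===== PRECONDITION & SPEC =====
-- Pre_ excludes only the empty string, on which A raises IndexError (str[0]).
def Pre_camel_to_snake (str : String) : Prop := str ≠ ""
instance (str : String) : Decidable (Pre_camel_to_snake str) := by unfold Pre_camel_to_snake; infer_instance
def pvWitness_camel_to_snake : String := "camelCase"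

def Spec_camel_to_snake (str : String) (out : String) : Prop := out = camel_to_snake_alt str
instance (str : String) (out : String) : Decidable (Spec_camel_to_snake str out) := by unfold Spec_camel_to_snake; infer_instance

-- ===== CLAIM (what is proved, stated in full; the proofs are below) =====
def Claim_equal_camel_to_snake : Prop := ∀ (str : String), Dom_camel_to_snake str → Pre_camel_to_snake str → Spec_camel_to_snake str (camel_to_snake str)

-- ===== LEMMAS AND PROOFS =====
-- membership in the literal 'A'..'Z' string is exactly the ASCII range test
theorem upper_mem_iff (c : Char) :
    ("ABCDEFGHIJKLMNOPQRSTUVWXYZ".toList.contains c) = ('A' ≤ c && c ≤ 'Z') := by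
  have h : "ABCDEFGHIJKLMNOPQRSTUVWXYZ".toList = ['A','B','C','D','E','F','G','H','I','J','K','L','M','N','O','P','Q','R','S','T','U','V','W','X','Y','Z'] := rfl
  rw [h, Bool.eq_iff_iff]
  have hA : ∀ d : Char, (c = d ↔ c.toNat = d.toNat) := fun d =>
    ⟨fun hh => hh ▸ rfl, fun hh => Char.ext (UInt32.toNat_inj.mp hh)⟩
  have hle : ∀ d : Char, (d ≤ c ↔ d.toNat ≤ c.toNat) := fun d =>
    (Char.le_def).trans (UInt32.le_iff_toNat_le)
  have hle2 : ∀ d : Char, (c ≤ d ↔ c.toNat ≤ d.toNat) := fun d =>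
    (Char.le_def).trans (UInt32.le_iff_toNat_le)
  simp only [List.contains_cons, List.contains_nil, Bool.or_eq_true, beq_iff_eq,
    Bool.and_eq_true, decide_eq_true_eq, Bool.or_false, hA, hle, hle2,
    show ('A'.toNat = 65) from rfl, show ('B'.toNat = 66) from rfl, show ('C'.toNat = 67) from rfl, show ('D'.toNat = 68) from rfl, show ('E'.toNat = 69) from rfl, show ('F'.toNat = 70) from rfl, show ('G'.toNat = 71) from rfl, show ('H'.toNat = 72) from rfl, show ('I'.toNat = 73) from rfl, show ('J'.toNat = 74) from rfl, show ('K'.toNat = 75) from rfl, show ('L'.toNat = 76) from rfl, show ('M'.toNat = 77) from rfl, show ('N'.toNat = 78) from rfl, show ('O'.toNat = 79) from rfl, show ('P'.toNat = 80) from rfl, show ('Q'.toNat = 81) from rfl, show ('R'.toNat = 82) from rfl, show ('S'.toNat = 83) from rfl, show ('T'.toNat = 84) from rfl, show ('U'.toNat = 85) from rfl, show ('V'.toNat = 86) from rfl, show ('W'.toNat = 87) from rfl, show ('X'.toNat = 88) from rfl, show ('Y'.toNat = 89) from rfl, show ('Z'.toNat = 90) from rfl]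
  omega

theorem camel_to_snake_eq (str : String) (h : str ≠ "") :
    camel_to_snake str = camel_to_snake_alt str := by
  unfold camel_to_snake camel_to_snake_alt
  cases hs : str.toList with
  | nil => exact absurd (String.toList_eq_nil_iff.mp hs) h
  | cons c0 rest =>
    simp only []
    have hbody : rest.foldl (fun res c =>
        if "ABCDEFGHIJKLMNOPQRSTUVWXYZ".toList.contains c then
          (res ++ ['_']) ++ [PySem.Chars.lowerChar c]
        else res ++ [c]) [PySem.Chars.lowerChar c0]
      = [PySem.Chars.lowerChar c0] ++
        rest.flatMap (fun c => if 'A' ≤ c && c ≤ 'Z'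
          then ['_', PySem.Chars.lowerChar c] else [c]) := by
      rw [PySem.List.foldl_congr_mem (g := fun res c => res ++
            (if 'A' ≤ c && c ≤ 'Z' then ['_', PySem.Chars.lowerChar c] else [c]))]
      · exact PySem.List.foldl_append_eq_flatMap _ _ _
      · intro acc x _
        rw [upper_mem_iff]
        split_ifs <;> simp
    rw [hbody]
    rfl

-- ===== VERDICT (by name: the statement is the Claim_ definition above) =====
theorem camel_to_snake_spec : Claim_equal_camel_to_snake := by
  intro str _ hpre
  exact camel_to_snake_eq str hpre
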